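-- pv_equiv track=rewrite | github.com/silverwestK/Coding-Test-Study | HackerRank Solutions/String/funnystring_easy_LHN.py | funnyString
-- ===== SOURCE A (Python) =====
-- def funnyString(s):
--     # Write your code here
--     s_list = []
--     for i in s:
--     	s_list.append(ord(i))
--     s_c_list = []
--     for i in range(len(s_list)-1):
--     	s_c_list.append(abs(s_list[i] - s_list[i+1]))
--     if s_c_list == list(reversed(s_c_list)):
--     	return 'Funny'
--     else:
--     	return 'Not Funny'
-- ===== SOURCE B (Python) =====
-- def funnyString(s):
--     # Two converging pointers over character pairs; no ord list or
--     # difference list is built, and we exit early on the first mismatch.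
--     n = len(s)
--     i, j = 0, n - 2
--     while i < j:
--         if abs(ord(s[i]) - ord(s[i + 1])) != abs(ord(s[j]) - ord(s[j + 1])):
--             return 'Not Funny'
--         i += 1
--         j -= 1
--     return 'Funny'
-- ===== Notes on version B (the rewrite author's own statement) =====
-- stated objective: simpler
-- what changed: Replaces A's build-ord-list / build-difference-list / compare-with-reversed-copy pipeline by a single two-pointer loop that compares mirrored adjacent-character differences on the fly with early exit, materializing no intermediate lists.
import Mathlib
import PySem

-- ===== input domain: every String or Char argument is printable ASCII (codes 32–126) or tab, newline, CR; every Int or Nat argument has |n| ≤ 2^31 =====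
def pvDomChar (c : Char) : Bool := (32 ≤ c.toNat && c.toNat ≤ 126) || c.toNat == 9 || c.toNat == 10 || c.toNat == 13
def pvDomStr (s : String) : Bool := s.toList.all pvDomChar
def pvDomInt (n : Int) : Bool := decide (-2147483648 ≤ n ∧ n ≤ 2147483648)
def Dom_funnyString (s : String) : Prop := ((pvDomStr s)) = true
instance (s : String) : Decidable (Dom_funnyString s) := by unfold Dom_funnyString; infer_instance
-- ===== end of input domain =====

-- B replaces A's build-ord-list/build-difference-list/compare-with-reverse pipeline by a
-- two-pointer loop comparing mirrored adjacent differences on the fly (objective: simpler).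

-- ===== PORT A =====
def funnyString (s : String) : String :=
  let sList : List Int := s.toList.foldl (fun acc c => acc ++ [(c.toNat : Int)]) []
  let scList : List Int :=
    (PySem.List.pyRange 0 ((sList.length : Int) - 1) 1).foldl
      (fun acc i => acc ++ [|PySem.List.pyGetD sList i 0 - PySem.List.pyGetD sList (i + 1) 0|]) []
  if scList = scList.reverse then "Funny" else "Not Funny"

-- ===== PORT B =====
-- abs(ord(s[i]) - ord(s[i+1])); every index B uses is in range, so getD is exact here
def funnyDiffAt (t : List Char) (i : Nat) : Int :=
  |((t.getD i ' ').toNat : Int) - ((t.getD (i + 1) ' ').toNat : Int)|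

-- the while loop of B: i from the left, j from the right, converging, early exit
def funnyLoop (t : List Char) (i j : Nat) : Bool :=
  if _h : i < j then
    if funnyDiffAt t i = funnyDiffAt t j then funnyLoop t (i + 1) (j - 1) else false
  else true
termination_by j - i

def funnyString_alt (s : String) : String :=
  let t := s.toList
  if funnyLoop t 0 (t.length - 2) then "Funny" else "Not Funny"

-- ===== PRECONDITION & SPEC =====
def Spec_funnyString (s : String) (out : String) : Prop := out = funnyString_alt s
instance (s : String) (out : String) : Decidable (Spec_funnyString s out) := by unfold Spec_funnyString; infer_instance

-- ===== CLAIM (what is proved, stated in full; the proofs are below) =====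
def Claim_equal_funnyString : Prop := ∀ (s : String), Dom_funnyString s → Spec_funnyString s (funnyString s)

-- ===== LEMMAS AND PROOFS =====

-- A's difference list is the range-map of funnyDiffAt
lemma funnyA_scList (t : List Char) :
    (PySem.List.pyRange 0 (((t.map (fun c => (c.toNat : Int))).length : Int) - 1) 1).map
      (fun i => |PySem.List.pyGetD (t.map (fun c => (c.toNat : Int))) i 0
                 - PySem.List.pyGetD (t.map (fun c => (c.toNat : Int))) (i + 1) 0|)
    = (List.range (t.length - 1)).map (funnyDiffAt t) := by
  rw [PySem.List.pyRange_one, List.map_map]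
  have hlen : (((t.map (fun c => (c.toNat : Int))).length : Int) - 1 - 0).toNat = t.length - 1 := by
    simp only [List.length_map]; omega
  rw [hlen]
  apply List.map_congr_left
  intro k hk
  rw [List.mem_range] at hk
  have hk1 : k < t.length := by omega
  have hk2 : k + 1 < t.length := by omega
  simp only [Function.comp_apply]
  have h1 : (0 : Int) + (k : Int) = ((k : Nat) : Int) := by omega
  rw [h1]
  have h2 : ((k : Nat) : Int) + 1 = (((k + 1 : Nat)) : Int) := by push_cast; ring
  rw [h2, PySem.List.pyGetD_natCast, PySem.List.pyGetD_natCast]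
  simp [funnyDiffAt, List.getD_eq_getElem?_getD, hk1, hk2]

-- palindromicity of a range-map, elementwise
lemma range_map_palindrome (m : Nat) (f : Nat → Int) :
    ((List.range m).map f = ((List.range m).map f).reverse)
      ↔ (∀ k, k < m → f k = f (m - 1 - k)) := by
  constructor
  · intro h k hk
    have hmk : m - 1 - k < m := by omega
    have e1 : ((List.range m).map f)[k]? = some (f k) := by
      rw [List.getElem?_map]
      simp [hk]
    have e2 : (((List.range m).map f).reverse)[k]? = some (f (m - 1 - k)) := by
      rw [List.getElem?_reverse (by simp [hk])]
      rw [List.getElem?_map]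
      simp only [List.length_map, List.length_range]
      simp [hmk]
    have := congrArg (fun l => l[k]?) h
    simp only [e1, e2] at this
    exact Option.some.inj this
  · intro h
    apply List.ext_getElem (by simp)
    intro k hk hk'
    simp only [List.length_map, List.length_range] at hk
    rw [List.getElem_reverse]
    simp only [List.getElem_map, List.getElem_range, List.length_map, List.length_range]
    exact h k hk

-- characterisation of B's loop
lemma funnyLoop_iff (t : List Char) :
    ∀ (n i j : Nat), j - i ≤ n →
      (funnyLoop t i j = true ↔ ∀ k, i ≤ k → k ≤ j → funnyDiffAt t k = funnyDiffAt t (i + j - k)) := by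
  intro n
  induction n with
  | zero =>
    intro i j hn
    rw [funnyLoop]
    have hij : ¬ i < j := by omega
    simp only [hij, dite_false]
    constructor
    · intro _ k hik hkj
      have hki : k = i := by omega
      have he : i + j - k = k := by omega
      rw [he]
    · intro _; trivial
  | succ n ih =>
    intro i j hn
    rw [funnyLoop]
    by_cases hij : i < j
    · simp only [hij, dite_true]
      by_cases heq : funnyDiffAt t i = funnyDiffAt t j
      · simp only [heq, if_true]
        rw [ih (i + 1) (j - 1) (by omega)]
        constructor
        · intro h k hik hkj
          rcases Nat.lt_or_ge k (i + 1) with hk | hk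
          · have hki : k = i := by omega
            have he : i + j - k = j := by omega
            rw [hki, show i + j - i = j from by omega]; exact heq
          · rcases Nat.lt_or_ge (j - 1) k with hk2 | hk2
            · have hkj' : k = j := by omega
              have he : i + j - k = i := by omega
              rw [hkj', show i + j - j = i from by omega]; exact heq.symm
            · have := h k hk hk2
              have harith : i + 1 + (j - 1) - k = i + j - k := by omega
              rwa [harith] at this
        · intro h k hik hkj
          have := h k (by omega) (by omega)
          have harith : i + 1 + (j - 1) - k = i + j - k := by omega
          rwa [harith]
      · simp only [heq, if_false]
        constructor
        · intro h; exact absurd h (by simp)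
        · intro h
          have := h i le_rfl (by omega)
          have he : i + j - i = j := by omega
          rw [he] at this
          exact absurd this heq
    · simp only [hij, dite_false]
      constructor
      · intro _ k hik hkj
        have he : i + j - k = k := by omega
        rw [he]
      · intro _; trivial

-- ===== VERDICT (by name: the statement is the Claim_ definition above) =====
theorem funnyString_spec : Claim_equal_funnyString := by
  intro s _
  unfold Spec_funnyString funnyString funnyString_alt
  simp only [PySem.List.foldl_append_singleton_eq_map, List.nil_append, funnyA_scList]
  set t := s.toList with ht
  have key : ((List.range (t.length - 1)).map (funnyDiffAt t)
        = ((List.range (t.length - 1)).map (funnyDiffAt t)).reverse)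
      ↔ funnyLoop t 0 (t.length - 2) = true := by
    rw [range_map_palindrome, funnyLoop_iff t (t.length - 2) 0 (t.length - 2) le_rfl]
    constructor
    · intro h k _ hkj
      rcases Nat.lt_or_ge t.length 2 with hs | hs
      · have hk0 : k = 0 := by omega
        rw [hk0, show 0 + (t.length - 2) - 0 = 0 from by omega]
      · have := h k (by omega)
        have he : t.length - 1 - 1 - k = 0 + (t.length - 2) - k := by omega
        rwa [he] at this
    · intro h k hk
      have := h k (by omega) (by omega)
      have he : 0 + (t.length - 2) - k = t.length - 1 - 1 - k := by omega
      rwa [he] at this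
  by_cases h : funnyLoop t 0 (t.length - 2) = true
  · rw [if_pos (key.mpr h), if_pos h]
  · rw [if_neg (fun hc => h (key.mp hc)), if_neg h]
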